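-- pv_equiv track=rewrite | github.com/micwo99/Introduction-to-python | Ex3/ex3.py | sum_of_vectors
-- ===== SOURCE A (Python) =====
-- def sum_of_vectors(vec_lst):
--     """ the function will receive a list of vectors and will will return the inner product of the vectors"""
--     lst = []  # it will be the list of the inner products of the vectors that the function received
--     summ = 0  # it will be the sum of the numbers in the same range of the vectors
--     j = 0
--     if vec_lst == []:
--         return None
--     if vec_lst[0] == []:
--         return []
--     # this loop give the list of the result from an addition of vectors
--     while j < len(vec_lst[0]):
--         summ = 0
--         for i in range(len(vec_lst)):
--             summ = summ + (vec_lst[i][j])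
--         lst.append(summ)
--         j = j + 1
--
--     return lst
-- ===== SOURCE B (Python) =====
-- def sum_of_vectors(vec_lst):
--     """Row-major re-implementation: accumulate each vector into a running
--     result list instead of recomputing each column with a nested scan."""
--     if vec_lst == []:
--         return None
--     n = len(vec_lst[0])
--     if n == 0:
--         return []
--     result = [0] * n
--     for vec in vec_lst:
--         result = [result[j] + vec[j] for j in range(n)]
--     return result
-- ===== Notes on version B (the rewrite author's own statement) =====
-- stated objective: alternative
-- what changed: Replaces A's column-major while/for with explicit i,j indexing (one pass per output column over all vectors) by a row-major single pass over the vectors that folds each vector into a running result list.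
import Mathlib
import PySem

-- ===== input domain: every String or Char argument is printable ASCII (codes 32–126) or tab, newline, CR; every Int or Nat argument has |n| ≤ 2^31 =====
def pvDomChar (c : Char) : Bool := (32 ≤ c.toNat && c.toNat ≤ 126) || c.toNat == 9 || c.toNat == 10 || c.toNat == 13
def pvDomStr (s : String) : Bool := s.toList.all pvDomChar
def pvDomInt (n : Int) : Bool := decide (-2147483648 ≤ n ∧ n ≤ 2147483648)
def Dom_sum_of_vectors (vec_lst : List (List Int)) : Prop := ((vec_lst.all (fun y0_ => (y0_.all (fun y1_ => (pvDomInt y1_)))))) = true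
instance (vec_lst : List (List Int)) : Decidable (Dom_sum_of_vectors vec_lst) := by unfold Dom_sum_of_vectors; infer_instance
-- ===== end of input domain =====

-- B replaces A's column-major nested index scans by a row-major fold of each vector
-- into a running result list (objective: alternative decomposition, same cost).

-- ===== PORT A =====
-- A: guards, then while j < len(vec_lst[0]): summ over i of vec_lst[i][j]; append.
-- pyGetD is exact under Pre_ (all indices in range there).
def sum_of_vectors (vec_lst : List (List Int)) : Option (List Int) :=
  if vec_lst = [] then none
  else
    let v0 := PySem.List.pyGetD vec_lst 0 []
    if v0 = [] then some []
    else
      some ((PySem.List.pyRange 0 (v0.length : Int) 1).foldl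
        (fun lst j =>
          lst ++ [(PySem.List.pyRange 0 (vec_lst.length : Int) 1).foldl
            (fun summ i => summ + PySem.List.pyGetD (PySem.List.pyGetD vec_lst i []) j 0) 0])
        [])

-- ===== PORT B =====
-- B: result = [0]*n; for vec: result = [result[j] + vec[j] for j in range(n)].
def sum_of_vectors_alt (vec_lst : List (List Int)) : Option (List Int) :=
  if vec_lst = [] then none
  else
    let n := (PySem.List.pyGetD vec_lst 0 []).length
    if n = 0 then some []
    else
      some (vec_lst.foldl
        (fun result vec =>
          (List.range n).map (fun j => result.getD j 0 + PySem.List.pyGetD vec (j : Int) 0))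
        (List.replicate n 0))

-- ===== PRECONDITION & SPEC =====
-- Pre_ excludes exactly the ragged inputs where some vector is shorter than the first
-- one: there Python A raises IndexError (and Python B raises the same way).
def Pre_sum_of_vectors (vec_lst : List (List Int)) : Prop :=
  vec_lst = [] ∨ ∀ v ∈ vec_lst, (PySem.List.pyGetD vec_lst 0 []).length ≤ v.length
instance (vec_lst : List (List Int)) : Decidable (Pre_sum_of_vectors vec_lst) := by
  unfold Pre_sum_of_vectors; infer_instance

def pvWitness_sum_of_vectors : List (List Int) := [[1, 2], [3, 4]]

def Spec_sum_of_vectors (vec_lst : List (List Int)) (out : Option (List Int)) : Prop := out = sum_of_vectors_alt vec_lst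
instance (vec_lst : List (List Int)) (out : Option (List Int)) : Decidable (Spec_sum_of_vectors vec_lst out) := by unfold Spec_sum_of_vectors; infer_instance

-- ===== CLAIM (what is proved, stated in full; the proofs are below) =====
def Claim_equal_sum_of_vectors : Prop := ∀ (vec_lst : List (List Int)), Dom_sum_of_vectors vec_lst → Pre_sum_of_vectors vec_lst → Spec_sum_of_vectors vec_lst (sum_of_vectors vec_lst)

-- ===== LEMMAS AND PROOFS =====

-- A's value in closed form: a column-sum per index j < n.
theorem sum_of_vectors_closed (vec_lst : List (List Int)) (h : vec_lst ≠ [])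
    (hn : PySem.List.pyGetD vec_lst 0 [] ≠ []) :
    sum_of_vectors vec_lst =
      some ((List.range (PySem.List.pyGetD vec_lst 0 []).length).map
        (fun j => vec_lst.foldl (fun s v => s + v.getD j 0) 0)) := by
  unfold sum_of_vectors
  simp only [if_neg h, if_neg hn]
  rw [PySem.List.foldl_append_singleton_eq_map, List.nil_append]
  have h1 : (PySem.List.pyRange 0 ((PySem.List.pyGetD vec_lst 0 []).length : Int) 1).map
        (fun j => (PySem.List.pyRange 0 ((vec_lst.length : Int)) 1).foldl
          (fun summ i => summ + PySem.List.pyGetD (PySem.List.pyGetD vec_lst i []) j 0) 0)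
      = (PySem.List.pyRange 0 ((PySem.List.pyGetD vec_lst 0 []).length : Int) 1).map
        (fun j => vec_lst.foldl (fun s v => s + PySem.List.pyGetD v j 0) 0) := by
    refine List.map_congr_left fun j _ => ?_
    exact PySem.List.foldl_pyRange_zero_pyGetD' vec_lst ([] : List Int)
      (fun summ v => summ + PySem.List.pyGetD v j 0) 0
  rw [h1, PySem.List.pyRange_zero_nat, List.map_map]
  refine congrArg some (List.map_congr_left fun j _ => ?_)
  simp

-- B's fold, characterized: folding vectors into an accumulator of the shape
-- (range n).map g keeps that shape while adding each vector pointwise.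
theorem alt_fold_closed (n : Nat) (ws : List (List Int)) :
    ∀ g : Nat → Int,
      ws.foldl
        (fun result vec =>
          (List.range n).map (fun j => result.getD j 0 + PySem.List.pyGetD vec (j : Int) 0))
        ((List.range n).map g)
      = (List.range n).map (fun j => ws.foldl (fun s v => s + v.getD j 0) (g j)) := by
  induction ws with
  | nil => intro g; rfl
  | cons v ws ih =>
    intro g
    simp only [List.foldl_cons]
    have hstep :
        (List.range n).map
            (fun j => ((List.range n).map g).getD j 0 + PySem.List.pyGetD v (j : Int) 0)
          = (List.range n).map (fun j => g j + v.getD j 0) := by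
      refine List.map_congr_left fun j hj => ?_
      have hj' := List.mem_range.mp hj
      simp [List.getD_eq_getElem?_getD, List.getElem?_map, List.getElem?_range hj']
    rw [hstep, ih]

-- ===== VERDICT (by name: the statement is the Claim_ definition above) =====
theorem sum_of_vectors_spec : Claim_equal_sum_of_vectors := by
  intro vec_lst _ _
  unfold Spec_sum_of_vectors
  by_cases h : vec_lst = []
  · subst h; rfl
  · by_cases hn : PySem.List.pyGetD vec_lst 0 [] = []
    · unfold sum_of_vectors sum_of_vectors_alt
      simp [h, hn]
    · rw [sum_of_vectors_closed vec_lst h hn]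
      unfold sum_of_vectors_alt
      have hlen : (PySem.List.pyGetD vec_lst 0 []).length ≠ 0 := by
        simpa [List.length_eq_zero_iff] using hn
      simp only [if_neg h, if_neg hlen]
      have hrep : (List.replicate (PySem.List.pyGetD vec_lst 0 []).length (0 : Int))
          = (List.range (PySem.List.pyGetD vec_lst 0 []).length).map (fun _ => (0 : Int)) := by
        simp
      rw [hrep, alt_fold_closed]
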